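-- pv_equiv track=rewrite | github.com/kinkusuma/tdw-010521 | 2.py | urut_kata
-- ===== SOURCE A (Python) =====
-- def urut_kata(kata):
--   kata = kata.split(' ')
--   output = ''
--   for i in range(1, 10):
--     for j in kata:
--       if str(i) in j:
--         output += j + ' '
--   return output
-- ===== SOURCE B (Python) =====
-- def urut_kata(kata):
--   buckets = [[] for _ in range(9)]
--   for w in kata.split(' '):
--     for i in range(9):
--       if str(i + 1) in w:
--         buckets[i].append(w + ' ')
--   return ''.join(''.join(b) for b in buckets)
-- ===== Notes on version B (the rewrite author's own statement) =====
-- stated objective: alternative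
-- what changed: A single pass over the words fills nine per-digit bucket lists which are concatenated in digit order at the end, instead of A's nine re-scans of the word list with string += accumulation.
import Mathlib
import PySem

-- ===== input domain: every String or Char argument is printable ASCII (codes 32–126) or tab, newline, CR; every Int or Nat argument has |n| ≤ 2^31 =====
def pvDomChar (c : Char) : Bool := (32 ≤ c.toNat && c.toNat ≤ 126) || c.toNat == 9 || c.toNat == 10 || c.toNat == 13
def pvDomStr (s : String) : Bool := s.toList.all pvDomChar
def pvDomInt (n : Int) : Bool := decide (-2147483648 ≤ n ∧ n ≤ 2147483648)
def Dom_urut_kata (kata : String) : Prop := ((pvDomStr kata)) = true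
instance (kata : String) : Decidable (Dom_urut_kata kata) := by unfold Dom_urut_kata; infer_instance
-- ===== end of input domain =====

-- B replaces A's nine re-scans with += accumulation by one pass filling nine per-digit
-- bucket lists concatenated at the end (alternative decomposition, not measured faster).

-- ===== PORT A =====
def urut_kata (kata : String) : String :=
  let words := (PySem.Str.split? kata " ").getD []   -- sep " " ≠ "", so split? is always some
  (PySem.List.pyRange 1 10 1).foldl
    (fun output i =>
      words.foldl
        (fun output j =>
          if PySem.Str.isIn (PySem.Int.toStr i) j then output ++ (j ++ " ") else output)
        output)
    ""

-- ===== PORT B =====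
def urut_kata_alt (kata : String) : String :=
  let buckets : List (List String) :=
    ((PySem.Str.split? kata " ").getD []).foldl
      (fun bs w =>
        (List.range 9).foldl
          (fun bs (i : Nat) =>
            if PySem.Str.isIn (PySem.Int.toStr ((i : Int) + 1)) w then
              bs.set i (bs.getD i [] ++ [w ++ " "])
            else bs)
          bs)
      (List.replicate 9 [])
  PySem.Str.join "" (buckets.map (fun b => PySem.Str.join "" b))

-- ===== PRECONDITION & SPEC =====
def Spec_urut_kata (kata : String) (out : String) : Prop := out = urut_kata_alt kata
instance (kata : String) (out : String) : Decidable (Spec_urut_kata kata out) := by unfold Spec_urut_kata; infer_instance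

-- ===== CLAIM (what is proved, stated in full; the proofs are below) =====
def Claim_equal_urut_kata : Prop := ∀ (kata : String), Dom_urut_kata kata → Spec_urut_kata kata (urut_kata kata)

-- ===== LEMMAS AND PROOFS =====

/-- the chars contributed by digit `i`: every word containing `str i`, followed by a space -/
def pvT (i : Int) (ws : List String) : List Char :=
  ((ws.filter (fun j => PySem.Str.isIn (PySem.Int.toStr i) j)).map
    (fun j => j.toList ++ [' '])).flatten

lemma pvA_inner (i : Int) (ws : List String) (acc : String) :
    (ws.foldl
      (fun output j =>
        if PySem.Str.isIn (PySem.Int.toStr i) j then output ++ (j ++ " ") else output)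
      acc).toList = acc.toList ++ pvT i ws := by
  induction ws generalizing acc with
  | nil => simp [pvT]
  | cons w ws ih =>
    rw [List.foldl_cons]
    by_cases h : PySem.Str.isIn (PySem.Int.toStr i) w
    · rw [if_pos h, ih]
      have h' : PySem.Chars.isIn (PySem.Int.toChars i) w.toList = true := by simpa using h
      simp [pvT, h']
    · rw [if_neg h, ih]
      have h' : PySem.Chars.isIn (PySem.Int.toChars i) w.toList = false := by simpa using h
      simp [pvT, h']

lemma pvChars_join_nil (L : List (List Char)) :
    PySem.Chars.join [] L = L.flatten := by
  induction L with
  | nil => simp [PySem.Chars.join_nil]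
  | cons p rest ih =>
    cases rest with
    | nil => simp [PySem.Chars.join, List.intercalate]
    | cons q rest' => simpa [PySem.Chars.join_cons_cons] using ih

lemma pvJoin_toList (l : List String) :
    (PySem.Str.join "" l).toList = (l.map String.toList).flatten := by
  rw [PySem.Str.toList_join]
  simpa using pvChars_join_nil (l.map String.toList)

/-- B's inner-loop step, named for the proofs (definitionally the port's lambda) -/
def pvStep (w : String) (bs : List (List String)) (i : Nat) : List (List String) :=
  if PySem.Str.isIn (PySem.Int.toStr ((i : Int) + 1)) w then
    bs.set i (bs.getD i [] ++ [w ++ " "])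
  else bs

/-- effect of B's inner loop over `List.range n` on the buckets, pointwise -/
lemma pvB_inner (w : String) (n : Nat) (bs : List (List String)) (hn : n ≤ bs.length) :
    ((List.range n).foldl (pvStep w) bs).length = bs.length ∧
    ∀ k : Nat, ((List.range n).foldl (pvStep w) bs).getD k [] =
        if k < n ∧ PySem.Str.isIn (PySem.Int.toStr ((k : Int) + 1)) w then
          bs.getD k [] ++ [w ++ " "]
        else bs.getD k [] := by
  induction n with
  | zero => exact ⟨rfl, fun k => by simp⟩
  | succ n ih =>
    obtain ⟨hlen, hget⟩ := ih (Nat.le_of_succ_le hn)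
    rw [List.range_succ, List.foldl_append, List.foldl_cons, List.foldl_nil]
    generalize hF : (List.range n).foldl (pvStep w) bs = F at hlen hget ⊢
    constructor
    · unfold pvStep
      split_ifs with hw
      · simp [List.length_set, hlen]
      · exact hlen
    · intro k
      unfold pvStep
      by_cases hw : PySem.Str.isIn (PySem.Int.toStr ((n : Int) + 1)) w
      · rw [if_pos hw, List.getD_eq_getElem?_getD, List.getElem?_set]
        by_cases hk : n = k
        · subst hk
          have hlt : n < F.length := by omega
          rw [if_pos rfl, if_pos hlt, Option.getD_some]
          have hn' := hget n
          rw [if_neg (by omega)] at hn'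
          rw [hn', if_pos ⟨by omega, hw⟩]
        · rw [if_neg hk, ← List.getD_eq_getElem?_getD, hget k]
          by_cases hk2 : k < n
          · have h1 : k < n + 1 := by omega
            simp [hk2, h1]
          · have h3 : ¬ (k < n + 1) := by omega
            simp [hk2, h3]
      · rw [if_neg hw, hget k]
        by_cases hk : n = k
        · subst hk
          have hw' : PySem.Chars.isIn (PySem.Int.toChars ((n : Int) + 1)) w.toList = false := by
            simpa using hw
          simp [hw']
        · by_cases hk2 : k < n
          · have h1 : k < n + 1 := by omega
            simp [hk2, h1]
          · have h3 : ¬ (k < n + 1) := by omega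
            simp [hk2, h3]

/-- effect of B's outer loop: bucket `k` collects every word containing digit `k+1` -/
lemma pvB_outer (ws : List String) (bs : List (List String)) (hlen : bs.length = 9) :
    (ws.foldl (fun bs w => (List.range 9).foldl (pvStep w) bs) bs).length = 9 ∧
    ∀ k : Nat, k < 9 →
      (ws.foldl (fun bs w => (List.range 9).foldl (pvStep w) bs) bs).getD k [] =
        bs.getD k [] ++
          (ws.filter (fun j => PySem.Str.isIn (PySem.Int.toStr ((k : Int) + 1)) j)).map
            (fun j => j ++ " ") := by
  induction ws generalizing bs with
  | nil => exact ⟨hlen, fun k _ => by simp⟩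
  | cons w ws ih =>
    obtain ⟨h1, h2⟩ := pvB_inner w 9 bs (by omega)
    obtain ⟨ihl, ihg⟩ := ih _ (h1.trans hlen)
    refine ⟨by simpa using ihl, fun k hk => ?_⟩
    rw [List.foldl_cons, ihg k hk, h2 k]
    by_cases hw : PySem.Str.isIn (PySem.Int.toStr ((k : Int) + 1)) w
    · have hw' : PySem.Chars.isIn (PySem.Int.toChars ((k : Int) + 1)) w.toList = true := by
        simpa using hw
      simp [hk, hw']
    · have hw' : PySem.Chars.isIn (PySem.Int.toChars ((k : Int) + 1)) w.toList = false := by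
        simpa using hw
      simp [hk, hw']

lemma pvBucket_eq_T (i : Int) (ws : List String) :
    (((ws.filter (fun j => PySem.Str.isIn (PySem.Int.toStr i) j)).map
        (fun j => j ++ " ")).map String.toList).flatten = pvT i ws := by
  rw [pvT, List.map_map]
  refine congrArg List.flatten (List.map_congr_left fun j _ => ?_)
  simp [Function.comp]

-- ===== VERDICT (by name: the statement is the Claim_ definition above) =====
theorem urut_kata_spec : Claim_equal_urut_kata := by
  intro kata _
  unfold Spec_urut_kata urut_kata urut_kata_alt
  rw [← String.toList_inj]
  have hrw : (fun (bs : List (List String)) (w : String) =>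
      (List.range 9).foldl
        (fun (bs : List (List String)) (i : Nat) =>
          if PySem.Str.isIn (PySem.Int.toStr ((i : Int) + 1)) w then
            bs.set i (bs.getD i [] ++ [w ++ " "])
          else bs) bs) =
      (fun bs w => (List.range 9).foldl (pvStep w) bs) := rfl
  rw [hrw]
  set ws := (PySem.Str.split? kata " ").getD [] with hws
  obtain ⟨hlen, hget⟩ := pvB_outer ws (List.replicate 9 []) (by simp)
  have hbk : ws.foldl (fun bs w => (List.range 9).foldl (pvStep w) bs) (List.replicate 9 []) =
      (List.range 9).map (fun (k : Nat) =>
        (ws.filter (fun j => PySem.Str.isIn (PySem.Int.toStr ((k : Int) + 1)) j)).map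
          (fun j => j ++ " ")) := by
    apply List.ext_getElem (by simp only [List.length_map, List.length_range]; exact hlen)
    intro i hi1 hi2
    have hi9 : i < 9 := by rw [hlen] at hi1; exact hi1
    have h := hget i hi9
    rw [List.getD_eq_getElem?_getD, List.getElem?_eq_getElem hi1, Option.getD_some] at h
    rw [h, List.getElem_map, List.getElem_range]
    simp only [List.getD_eq_getElem?_getD, List.getElem?_replicate, hi9, if_pos,
      Option.getD_some]
    simp
  rw [hbk]
  rw [show PySem.List.pyRange 1 10 1 = [1,2,3,4,5,6,7,8,9] from by decide]
  simp only [List.foldl_cons, List.foldl_nil]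
  rw [pvA_inner 9, pvA_inner 8, pvA_inner 7, pvA_inner 6, pvA_inner 5, pvA_inner 4,
      pvA_inner 3, pvA_inner 2, pvA_inner 1]
  rw [pvJoin_toList]
  simp only [show List.range 9 = [0,1,2,3,4,5,6,7,8] from by decide, List.map_cons,
    List.map_nil, List.flatten_cons, List.flatten_nil]
  simp only [pvJoin_toList]
  simp only [pvBucket_eq_T]
  norm_num
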